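-- pv_equiv track=rewrite | github.com/dzalitac/crib-analyzer | crib.py | get_combos
-- ===== SOURCE A (Python) =====
-- def get_combos(hand):
--     """Returns a list of all combinations of cards (list of lists)"""
--     combos = []
--     size = len(hand)
--
--     for i in range(size):
--         for j in range(i+1, size):
--             # add all pairs...
--             combos.append([i, j])
--             for k in range(j+1, size):
--                 # and triples..
--                 combos.append([i, j, k])
--                 for l in range(k+1, size):
--                     # and quadruples...
--                     combos.append([i, j, k, l])
--     # and finally the whole hand, if including cut card
--     if size == 5:
--         combos.append([i for i in range(size)])
--
--     return combos
-- ===== SOURCE B (Python) =====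
-- def get_combos(hand):
--     """Returns a list of all combinations of cards (list of lists)"""
--     size = len(hand)
--
--     def dfs(start, prefix):
--         out = []
--         for x in range(start, size):
--             cur = prefix + [x]
--             if len(cur) >= 2:
--                 out.append(cur)
--             if len(cur) < 4:
--                 out.extend(dfs(x + 1, cur))
--         return out
--
--     combos = dfs(0, [])
--     if size == 5:
--         combos.append(list(range(size)))
--     return combos
-- ===== Notes on version B (the rewrite author's own statement) =====
-- stated objective: simpler
-- what changed: Replaced A's four fixed-depth nested index loops by a single recursive DFS helper over (start, prefix) that emits each increasing index list of length 2-4 in the same preorder, keeping the size==5 full-hand append.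
import Mathlib
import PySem

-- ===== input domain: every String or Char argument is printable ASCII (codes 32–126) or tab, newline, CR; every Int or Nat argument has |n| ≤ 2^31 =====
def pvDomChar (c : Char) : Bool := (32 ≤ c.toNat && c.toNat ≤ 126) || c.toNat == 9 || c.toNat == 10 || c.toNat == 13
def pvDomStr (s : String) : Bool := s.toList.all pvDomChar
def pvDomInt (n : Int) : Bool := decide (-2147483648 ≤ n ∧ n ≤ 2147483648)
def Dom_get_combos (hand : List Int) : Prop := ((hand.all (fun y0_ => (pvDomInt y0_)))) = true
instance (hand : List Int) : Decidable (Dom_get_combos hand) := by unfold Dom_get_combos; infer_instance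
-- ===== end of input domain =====

-- B replaces A's four fixed-depth nested index loops by one recursive DFS helper emitting
-- every increasing index list of length 2–4 in the same preorder (objective: simpler, same cost).

-- ===== PORT A =====
def get_combos (hand : List Int) : List (List Int) :=
  let size : Int := hand.length
  let combos :=
    (PySem.List.pyRange 0 size 1).foldl (fun combos i =>
      (PySem.List.pyRange (i+1) size 1).foldl (fun combos j =>
        let combos := combos ++ [[i, j]]
        (PySem.List.pyRange (j+1) size 1).foldl (fun combos k =>
          let combos := combos ++ [[i, j, k]]
          (PySem.List.pyRange (k+1) size 1).foldl (fun combos l =>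
            combos ++ [[i, j, k, l]]) combos) combos) combos) []
  if size = 5 then combos ++ [PySem.List.pyRange 0 size 1] else combos

-- ===== PORT B =====
-- fuel is only a totality guard: each recursive call happens when cur.length < 4,
-- so fuel = 4 - prefix.length never reaches 0 on the calls the program makes.
def dfsCombos (size : Int) : Nat → Int → List Int → List (List Int)
  | 0, _, _ => []
  | fuel+1, start, pre =>
      (PySem.List.pyRange start size 1).foldl (fun out x =>
        let cur := pre ++ [x]
        let out := if 2 ≤ cur.length then out ++ [cur] else out
        if cur.length < 4 then out ++ dfsCombos size fuel (x+1) cur else out) []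

def get_combos_alt (hand : List Int) : List (List Int) :=
  let size : Int := hand.length
  let combos := dfsCombos size 4 0 []
  if size = 5 then combos ++ [PySem.List.pyRange 0 size 1] else combos

-- ===== PRECONDITION & SPEC =====
def Spec_get_combos (hand : List Int) (out : List (List Int)) : Prop := out = get_combos_alt hand
instance (hand : List Int) (out : List (List Int)) : Decidable (Spec_get_combos hand out) := by unfold Spec_get_combos; infer_instance

-- ===== CLAIM (what is proved, stated in full; the proofs are below) =====
def Claim_equal_get_combos : Prop := ∀ (hand : List Int), Dom_get_combos hand → Spec_get_combos hand (get_combos hand)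

-- ===== LEMMAS AND PROOFS =====

-- common normal form of both loop nests (flatMap over the ranges)
def pvG4 (s i j k : Int) : List (List Int) :=
  (PySem.List.pyRange (k+1) s 1).flatMap (fun l => [[i, j, k, l]])
def pvG3 (s i j : Int) : List (List Int) :=
  (PySem.List.pyRange (j+1) s 1).flatMap (fun k => [i, j, k] :: pvG4 s i j k)
def pvG2 (s i : Int) : List (List Int) :=
  (PySem.List.pyRange (i+1) s 1).flatMap (fun j => [i, j] :: pvG3 s i j)
def pvG1 (s : Int) : List (List Int) :=
  (PySem.List.pyRange 0 s 1).flatMap (fun i => pvG2 s i)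

theorem dfs4_eq (s : Int) : dfsCombos s 4 0 [] = pvG1 s := by
  simp only [dfsCombos]
  simp [pvG1, pvG2, pvG3, pvG4, List.flatMap_def]

-- A's loop levels, bottom-up (acc is the running combos list)
theorem a4_eq (s i j k : Int) (acc : List (List Int)) :
    (PySem.List.pyRange (k+1) s 1).foldl (fun combos l => combos ++ [[i, j, k, l]])
      (acc ++ [[i, j, k]]) = acc ++ ([i, j, k] :: pvG4 s i j k) := by
  simp [pvG4, List.flatMap_def]

theorem a3_eq (s i j : Int) (acc : List (List Int)) :
    (PySem.List.pyRange (j+1) s 1).foldl (fun combos k =>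
      let combos := combos ++ [[i, j, k]]
      (PySem.List.pyRange (k+1) s 1).foldl (fun combos l =>
        combos ++ [[i, j, k, l]]) combos)
      (acc ++ [[i, j]]) = acc ++ ([i, j] :: pvG3 s i j) := by
  simp only [a4_eq]
  simp [pvG3, List.flatMap_def]

theorem a2_eq (s i : Int) (acc : List (List Int)) :
    (PySem.List.pyRange (i+1) s 1).foldl (fun combos j =>
      let combos := combos ++ [[i, j]]
      (PySem.List.pyRange (j+1) s 1).foldl (fun combos k =>
        let combos := combos ++ [[i, j, k]]
        (PySem.List.pyRange (k+1) s 1).foldl (fun combos l =>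
          combos ++ [[i, j, k, l]]) combos) combos)
      acc = acc ++ pvG2 s i := by
  simp only [a3_eq]
  simp [pvG2, List.flatMap_def]

theorem a_loop_eq (s : Int) :
    (PySem.List.pyRange 0 s 1).foldl (fun combos i =>
      (PySem.List.pyRange (i+1) s 1).foldl (fun combos j =>
        let combos := combos ++ [[i, j]]
        (PySem.List.pyRange (j+1) s 1).foldl (fun combos k =>
          let combos := combos ++ [[i, j, k]]
          (PySem.List.pyRange (k+1) s 1).foldl (fun combos l =>
            combos ++ [[i, j, k, l]]) combos) combos) combos) [] = pvG1 s := by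
  simp only [a2_eq]
  simp [pvG1, List.flatMap_def]

-- ===== VERDICT (by name: the statement is the Claim_ definition above) =====
theorem get_combos_spec : Claim_equal_get_combos := by
  intro hand _
  unfold Spec_get_combos get_combos get_combos_alt
  simp only [a_loop_eq, dfs4_eq]
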